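-- pv_equiv track=rewrite | github.com/Krisje1973/AdventOfCode | AOCHelper.py | getReplacements
-- ===== SOURCE A (Python) =====
-- def getReplacements(s,replacements,charToReplace):
--     if s == "":
--         return [""]
--
--     return [
--         x + y
--         for x in (replacements if s[0] == charToReplace else s[0])
--         for y in getReplacements(s[1:],replacements,charToReplace)
--     ]
-- ===== SOURCE B (Python) =====
-- def getReplacements(s, replacements, charToReplace):
--     results = [""]
--     for ch in s:
--         opts = replacements if ch == charToReplace else [ch]
--         results = [p + o for p in results for o in opts]
--     return results
-- ===== Notes on version B (the rewrite author's own statement) =====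
-- stated objective: faster
-- what changed: Replaced the recursion that recomputes the whole suffix expansion once per option at every level with a single forward loop that extends a prefix-accumulator list once per character.
import Mathlib
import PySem

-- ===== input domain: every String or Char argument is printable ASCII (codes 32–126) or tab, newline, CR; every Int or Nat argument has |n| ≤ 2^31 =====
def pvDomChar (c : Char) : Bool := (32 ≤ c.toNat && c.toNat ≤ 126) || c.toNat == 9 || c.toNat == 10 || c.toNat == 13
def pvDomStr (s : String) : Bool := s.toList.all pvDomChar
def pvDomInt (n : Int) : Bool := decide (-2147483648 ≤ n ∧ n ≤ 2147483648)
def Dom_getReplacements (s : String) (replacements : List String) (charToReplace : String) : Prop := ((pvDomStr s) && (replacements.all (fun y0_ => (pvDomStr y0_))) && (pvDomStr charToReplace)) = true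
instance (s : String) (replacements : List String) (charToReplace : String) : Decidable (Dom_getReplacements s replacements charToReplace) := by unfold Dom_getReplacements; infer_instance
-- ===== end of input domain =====

-- B replaces A's recursion (which re-expands the whole suffix once per option at every level)
-- by one forward pass extending a prefix-accumulator list; equivalence of the return values is proved.

-- ===== PORT A =====
-- A recurses on the string: expand the first character's options, prepend each to every
-- expansion of the suffix (the suffix expansion is the same list for every option).
def getReplacementsAux (cs : List Char) (replacements : List String) (charToReplace : String) : List String :=
  match cs with
  | [] => [""]
  | c :: rest =>
    -- 'for x in (replacements if s[0]==charToReplace else s[0])': iterating a 1-char string yields that char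
    (if String.ofList [c] = charToReplace then replacements else [String.ofList [c]]).flatMap
      (fun x => (getReplacementsAux rest replacements charToReplace).map (fun y => x ++ y))

def getReplacements (s : String) (replacements : List String) (charToReplace : String) : List String :=
  getReplacementsAux s.toList replacements charToReplace

-- ===== PORT B =====
def getReplacements_alt (s : String) (replacements : List String) (charToReplace : String) : List String :=
  s.toList.foldl
    (fun results ch =>
      results.flatMap (fun p =>
        (if String.ofList [ch] = charToReplace then replacements else [String.ofList [ch]]).map
          (fun o => p ++ o)))
    [""]

-- ===== PRECONDITION & SPEC =====
def Spec_getReplacements (s : String) (replacements : List String) (charToReplace : String) (out : List String) : Prop := out = getReplacements_alt s replacements charToReplace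
instance (s : String) (replacements : List String) (charToReplace : String) (out : List String) : Decidable (Spec_getReplacements s replacements charToReplace out) := by unfold Spec_getReplacements; infer_instance

-- ===== CLAIM (what is proved, stated in full; the proofs are below) =====
def Claim_equal_getReplacements : Prop := ∀ (s : String) (replacements : List String) (charToReplace : String), Dom_getReplacements s replacements charToReplace → Spec_getReplacements s replacements charToReplace (getReplacements s replacements charToReplace)

-- ===== LEMMAS AND PROOFS =====
lemma foldl_eq_flatMap_aux (cs : List Char) (replacements : List String) (charToReplace : String)
    (acc : List String) :
    cs.foldl
      (fun results ch =>
        results.flatMap (fun p =>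
          (if String.ofList [ch] = charToReplace then replacements else [String.ofList [ch]]).map
            (fun o => p ++ o)))
      acc
    = acc.flatMap (fun p => (getReplacementsAux cs replacements charToReplace).map (fun y => p ++ y)) := by
  induction cs generalizing acc with
  | nil =>
    simp [getReplacementsAux]
  | cons c rest ih =>
    simp only [List.foldl_cons, ih, getReplacementsAux]
    simp [List.flatMap_assoc, List.map_flatMap, List.flatMap_map, List.map_map, Function.comp_def,
      String.append_assoc]

-- ===== VERDICT (by name: the statement is the Claim_ definition above) =====
theorem getReplacements_spec : Claim_equal_getReplacements := by
  intro s replacements charToReplace _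
  unfold Spec_getReplacements getReplacements getReplacements_alt
  rw [foldl_eq_flatMap_aux]
  simp
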